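-- pv_equiv track=rewrite | github.com/claha/advent-of-code | 2020/19/solve.py | create_exp
-- ===== SOURCE A (Python) =====
-- def create_exp(rule, rules):
--     """Create expression."""
--     exp = ""
--     opened = False
--     for sub_rule in rules[rule].split(" "):
--         if sub_rule in rules:
--             if not opened:
--                 exp += "("
--                 opened = True
--             sub_exp = create_exp(sub_rule, rules)
--             if len(sub_exp) == 1:
--                 exp += sub_exp
--             else:
--                 exp += "(" + sub_exp + ")"
--         else:
--             if opened:
--                 exp += ")"
--                 opened = False
--             exp += sub_rule
--     if opened:
--         exp += ")"
--     return exp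
-- ===== SOURCE B (Python) =====
-- def create_exp(rule, rules):
--     """Create expression (run-decomposition: split tokens into maximal runs
--     of reference / literal tokens, render each run, concatenate)."""
--     def wrap(t):
--         s = create_exp(t, rules)
--         return s if len(s) == 1 else "(" + s + ")"
--
--     def render(tokens):
--         if not tokens:
--             return ""
--         is_ref = tokens[0] in rules
--         j = 1
--         while j < len(tokens) and (tokens[j] in rules) == is_ref:
--             j += 1
--         run, rest = tokens[:j], tokens[j:]
--         if is_ref:
--             piece = "(" + "".join(wrap(t) for t in run) + ")"
--         else:
--             piece = "".join(run)
--         return piece + render(rest)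
--
--     return render(rules[rule].split(" "))
-- ===== Notes on version B (the rewrite author's own statement) =====
-- stated objective: alternative
-- what changed: A's single pass with a stateful `opened` flag is replaced by an explicit partition of the token list into maximal reference/literal runs, each run rendered independently (references wrapped and parenthesised as a group, literals joined) and the pieces concatenated.
import Mathlib
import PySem

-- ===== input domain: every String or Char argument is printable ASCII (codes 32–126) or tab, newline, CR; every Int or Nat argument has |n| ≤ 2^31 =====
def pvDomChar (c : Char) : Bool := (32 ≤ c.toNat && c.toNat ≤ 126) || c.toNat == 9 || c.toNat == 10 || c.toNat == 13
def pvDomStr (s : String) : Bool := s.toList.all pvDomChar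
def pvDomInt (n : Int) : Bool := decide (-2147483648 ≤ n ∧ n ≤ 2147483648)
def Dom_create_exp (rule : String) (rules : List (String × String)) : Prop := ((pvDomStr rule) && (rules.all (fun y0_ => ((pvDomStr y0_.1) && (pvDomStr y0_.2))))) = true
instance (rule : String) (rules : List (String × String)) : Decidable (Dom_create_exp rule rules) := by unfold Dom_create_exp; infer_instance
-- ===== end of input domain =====

-- B replaces A's stateful `opened`-flag loop by an explicit partition of the token list into
-- maximal reference/literal runs, rendering each run and concatenating (objective: alternative).
-- Both ports run the recursion over rules on a fuel of rules.length + 1, which suffices on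
-- every input admitted by Pre_ (rule is a key, no cycle reachable from rule).

-- ===== PORT A =====
-- rules[rule] lookup / `sub_rule in rules` on the dict-as-association-list (first match)
def pvLookup (rules : List (String × String)) (k : String) : Option String :=
  (rules.find? (fun p => p.1 == k)).map (·.2)

def pvIsKey (rules : List (String × String)) (k : String) : Bool :=
  (pvLookup rules k).isSome

-- rules[rule].split(" ")  (sep ≠ "", so split? is always some)
def pvSplitTokens (body : String) : List String :=
  (PySem.Str.split? body " ").getD []

-- the for-loop of A, state (exp, opened); sub = recursive expansion of a reference token
def pvRunA (sub : String → String) (isK : String → Bool) :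
    List String → String → Bool → String
  | [], exp, opened => if opened then exp ++ ")" else exp
  | t :: ts, exp, opened =>
    if isK t then
      let exp1 := if opened then exp else exp ++ "("
      let s := sub t
      pvRunA sub isK ts (if PySem.Str.len s == 1 then exp1 ++ s else exp1 ++ "(" ++ s ++ ")") true
    else
      pvRunA sub isK ts ((if opened then exp ++ ")" else exp) ++ t) false

def pvGoA : Nat → String → List (String × String) → String
  | 0, _, _ => ""
  | n+1, rule, rules =>
    match pvLookup rules rule with
    | none => ""   -- KeyError in Python; excluded by Pre_
    | some body => pvRunA (fun t => pvGoA n t rules) (pvIsKey rules) (pvSplitTokens body) "" false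

def create_exp (rule : String) (rules : List (String × String)) : String :=
  pvGoA (rules.length + 1) rule rules

-- ===== PORT B =====
-- wrap(t) of Source B
def pvWrap (sub : String → String) (t : String) : String :=
  let s := sub t
  if PySem.Str.len s == 1 then s else "(" ++ s ++ ")"

-- render(tokens) of Source B: peel off the maximal run sharing the head's membership flag
def pvRender (sub : String → String) (isK : String → Bool) : List String → String
  | [] => ""
  | t :: ts =>
    (if isK t then
       "(" ++ PySem.Str.join "" ((t :: ts.takeWhile (fun x => isK x == isK t)).map (pvWrap sub)) ++ ")"
     else
       PySem.Str.join "" (t :: ts.takeWhile (fun x => isK x == isK t)))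
    ++ pvRender sub isK (ts.dropWhile (fun x => isK x == isK t))
  termination_by toks => toks.length
  decreasing_by
    simp only [List.length_cons]
    exact Nat.lt_succ_of_le (List.length_dropWhile_le _ ts)

def pvGoB : Nat → String → List (String × String) → String
  | 0, _, _ => ""
  | n+1, rule, rules =>
    match pvLookup rules rule with
    | none => ""   -- KeyError in Python; excluded by Pre_
    | some body => pvRender (fun t => pvGoB n t rules) (pvIsKey rules) (pvSplitTokens body)

def create_exp_alt (rule : String) (rules : List (String × String)) : String :=
  pvGoB (rules.length + 1) rule rules

-- ===== PRECONDITION & SPEC =====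
-- dependency graph of the rule set: k → k' when k' is a key occurring among rules[k]'s tokens
def pvTokensOf (rules : List (String × String)) (k : String) : List String :=
  match pvLookup rules k with
  | none => []
  | some body => pvSplitTokens body

def pvSuccs (rules : List (String × String)) (k : String) : List String :=
  (pvTokensOf rules k).filter (pvIsKey rules)

-- keys reachable from the seed set in at most n steps (n = rules.length + 1 saturates)
def pvReach (rules : List (String × String)) : Nat → List String → List String
  | 0, cur => cur
  | n+1, cur => pvReach rules n ((cur ++ cur.flatMap (pvSuccs rules)).dedup)

-- Pre_ excludes exactly the inputs where Python A does not return: rule not a key of rules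
-- (KeyError) or some key reachable from rule lies on a reference cycle (infinite recursion).
def Pre_create_exp (rule : String) (rules : List (String × String)) : Prop :=
  pvIsKey rules rule = true ∧
  ∀ k ∈ pvReach rules (rules.length + 1) [rule],
    k ∉ pvReach rules (rules.length + 1) (pvSuccs rules k)

instance (rule : String) (rules : List (String × String)) : Decidable (Pre_create_exp rule rules) := by
  unfold Pre_create_exp; infer_instance

def pvWitness_create_exp : String × (List (String × String)) :=
  ("0", [("0", "1 2 | 2 1"), ("1", "a"), ("2", "a b")])

def Spec_create_exp (rule : String) (rules : List (String × String)) (out : String) : Prop := out = create_exp_alt rule rules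
instance (rule : String) (rules : List (String × String)) (out : String) : Decidable (Spec_create_exp rule rules out) := by unfold Spec_create_exp; infer_instance

-- ===== CLAIM (what is proved, stated in full; the proofs are below) =====
def Claim_equal_create_exp : Prop := ∀ (rule : String) (rules : List (String × String)), Dom_create_exp rule rules → Pre_create_exp rule rules → Spec_create_exp rule rules (create_exp rule rules)

-- ===== LEMMAS AND PROOFS =====

lemma pv_join_nil : PySem.Str.join "" ([] : List String) = "" := by
  simp [PySem.Str.join, PySem.Chars.join, List.intercalate]

lemma pv_join_cons (x : String) (xs : List String) :
    PySem.Str.join "" (x :: xs) = x ++ PySem.Str.join "" xs := by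
  cases xs with
  | nil => simp [PySem.Str.join, PySem.Chars.join, List.intercalate]
  | cons y ys => simp [PySem.Str.join, PySem.Chars.join, List.intercalate]

-- the string A appends for one reference token is exp ++ wrap(t)
lemma pv_wrap_step (sub : String → String) (u exp : String) :
    (if PySem.Str.len (sub u) == 1 then exp ++ sub u else exp ++ "(" ++ sub u ++ ")")
      = exp ++ pvWrap sub u := by
  unfold pvWrap
  by_cases h : (PySem.Str.len (sub u) == 1) = true
  · simp only [h, if_true]
  · simp only [h, Bool.false_eq_true, if_false]
    simp [String.append_assoc]

-- once the run of references is over (rest empty or starting with a literal),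
-- closing the parenthesis first changes nothing
lemma pvRunA_close (sub : String → String) (isK : String → Bool) (rest : List String)
    (h : rest = [] ∨ ∃ r rs, rest = r :: rs ∧ isK r = false) (exp : String) :
    pvRunA sub isK rest exp true = pvRunA sub isK rest (exp ++ ")") false := by
  rcases h with h | ⟨r, rs, rfl, hr⟩
  · subst h; simp [pvRunA]
  · simp [pvRunA, hr]

-- a run of reference tokens appends its wrapped expansions, flag stays open
lemma pvRunA_open (sub : String → String) (isK : String → Bool) :
    ∀ (run rest : List String), (∀ t ∈ run, isK t = true) → ∀ exp,
      pvRunA sub isK (run ++ rest) exp true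
        = pvRunA sub isK rest (exp ++ PySem.Str.join "" (run.map (pvWrap sub))) true := by
  intro run
  induction run with
  | nil => intro rest _ exp; simp [pv_join_nil]
  | cons u us ih =>
    intro rest h exp
    have hu : isK u = true := h u (by simp)
    simp only [List.cons_append, pvRunA, hu, if_true]
    rw [pv_wrap_step, ih rest (fun t ht => h t (by simp [ht])) _]
    rw [List.map_cons, pv_join_cons, ← String.append_assoc]

-- a run of literal tokens appends the tokens themselves, flag stays closed
lemma pvRunA_lit (sub : String → String) (isK : String → Bool) :
    ∀ (run rest : List String), (∀ t ∈ run, isK t = false) → ∀ exp,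
      pvRunA sub isK (run ++ rest) exp false
        = pvRunA sub isK rest (exp ++ PySem.Str.join "" run) false := by
  intro run
  induction run with
  | nil => intro rest _ exp; simp [pv_join_nil]
  | cons u us ih =>
    intro rest h exp
    have hu : isK u = false := h u (by simp)
    simp only [List.cons_append, pvRunA, hu, Bool.false_eq_true, if_false]
    rw [ih rest (fun t ht => h t (by simp [ht])) _, pv_join_cons, ← String.append_assoc]

-- the heart of the file: A's flag loop equals B's run decomposition
lemma pvRunA_eq_render (sub : String → String) (isK : String → Bool) :
    ∀ (N : Nat) (toks : List String), toks.length ≤ N → ∀ exp,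
      pvRunA sub isK toks exp false = exp ++ pvRender sub isK toks := by
  intro N
  induction N with
  | zero =>
    intro toks h exp
    have : toks = [] := List.length_eq_zero_iff.mp (Nat.le_zero.mp h)
    subst this; simp [pvRunA, pvRender]
  | succ N ih =>
    intro toks h exp
    cases toks with
    | nil => simp [pvRunA, pvRender]
    | cons t ts =>
      have hts : ts.length ≤ N := by simpa using h
      cases hbv : isK t with
      | true =>
        have hrun : ∀ x ∈ ts.takeWhile (fun x => isK x == true), isK x = true := by
          intro x hx; simpa using List.mem_takeWhile_imp hx
        have hrest : ts.dropWhile (fun x => isK x == true) = [] ∨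
            ∃ r rs, ts.dropWhile (fun x => isK x == true) = r :: rs ∧ isK r = false := by
          cases hd : ts.dropWhile (fun x => isK x == true) with
          | nil => exact Or.inl rfl
          | cons r rs =>
            refine Or.inr ⟨r, rs, rfl, ?_⟩
            have := List.head?_dropWhile_not (fun x => isK x == true) ts
            rw [hd] at this
            simpa using this
        have hlen : (ts.dropWhile (fun x => isK x == true)).length ≤ N :=
          le_trans (List.length_dropWhile_le _ ts) hts
        rw [pvRender]
        simp only [hbv, if_true]
        show pvRunA sub isK (t :: ts) exp false = _
        simp only [pvRunA, hbv, if_true, Bool.false_eq_true, if_false]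
        rw [pv_wrap_step]
        conv_lhs => rw [← List.takeWhile_append_dropWhile (p := fun x => isK x == true) (l := ts)]
        rw [pvRunA_open sub isK _ _ hrun]
        rw [pvRunA_close sub isK _ hrest]
        rw [ih _ hlen]
        rw [List.map_cons, pv_join_cons]
        simp [String.append_assoc]
      | false =>
        have hrun : ∀ x ∈ ts.takeWhile (fun x => isK x == false), isK x = false := by
          intro x hx; simpa using List.mem_takeWhile_imp hx
        have hlen : (ts.dropWhile (fun x => isK x == false)).length ≤ N :=
          le_trans (List.length_dropWhile_le _ ts) hts
        rw [pvRender]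
        simp only [hbv, Bool.false_eq_true, if_false]
        show pvRunA sub isK (t :: ts) exp false = _
        simp only [pvRunA, hbv, Bool.false_eq_true, if_false]
        conv_lhs => rw [← List.takeWhile_append_dropWhile (p := fun x => isK x == false) (l := ts)]
        rw [pvRunA_lit sub isK _ _ hrun]
        rw [ih _ hlen]
        rw [pv_join_cons]
        simp [String.append_assoc]

lemma pvGoA_eq_pvGoB (n : Nat) (rules : List (String × String)) :
    ∀ rule, pvGoA n rule rules = pvGoB n rule rules := by
  induction n with
  | zero => intro rule; rfl
  | succ n ih =>
    intro rule
    simp only [pvGoA, pvGoB]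
    cases pvLookup rules rule with
    | none => rfl
    | some body =>
      have hsub : (fun t => pvGoA n t rules) = (fun t => pvGoB n t rules) :=
        funext fun t => ih t
      show pvRunA (fun t => pvGoA n t rules) (pvIsKey rules) (pvSplitTokens body) "" false
          = pvRender (fun t => pvGoB n t rules) (pvIsKey rules) (pvSplitTokens body)
      rw [pvRunA_eq_render _ _ (pvSplitTokens body).length _ le_rfl, hsub]
      simp

-- ===== VERDICT (by name: the statement is the Claim_ definition above) =====
theorem create_exp_spec : Claim_equal_create_exp := by
  intro rule rules _ _
  unfold Spec_create_exp create_exp create_exp_alt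
  exact pvGoA_eq_pvGoB _ rules rule
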